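-- pv_equiv track=rewrite | github.com/Capslocktalk1/Surging-with-Power- | afterclass.py | powerEight
-- ===== SOURCE A (Python) =====
-- def powerEight(n):
--     count = 0
--     if (n & (n - 1)) == 0:
--         while n > 1:
--             n >>= 1
--             count += 1
--         if count % 3 == 0:
--             return 1
--     return 0
-- ===== SOURCE B (Python) =====
-- def powerEight(n):
--     if n <= 0:
--         return 0
--     while n % 8 == 0:
--         n //= 8
--     return 1 if n == 1 else 0
-- ===== Notes on version B (the rewrite author's own statement) =====
-- stated objective: simpler
-- what changed: B divides out factors of eight directly (while n % 8 == 0: n //= 8) and checks the residue is 1, instead of A's bit-trick power-of-two test followed by a shift-counting loop and a count % 3 check.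
-- intended difference: At n == 0 A returns 1 (0 & -1 == 0 and the loop never runs, so count stays 0), while B returns 0; 0 is not a power of eight, so B's value is the intended one. — e.g. on powerEight(0): A returns 1, B returns 0
import Mathlib
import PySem

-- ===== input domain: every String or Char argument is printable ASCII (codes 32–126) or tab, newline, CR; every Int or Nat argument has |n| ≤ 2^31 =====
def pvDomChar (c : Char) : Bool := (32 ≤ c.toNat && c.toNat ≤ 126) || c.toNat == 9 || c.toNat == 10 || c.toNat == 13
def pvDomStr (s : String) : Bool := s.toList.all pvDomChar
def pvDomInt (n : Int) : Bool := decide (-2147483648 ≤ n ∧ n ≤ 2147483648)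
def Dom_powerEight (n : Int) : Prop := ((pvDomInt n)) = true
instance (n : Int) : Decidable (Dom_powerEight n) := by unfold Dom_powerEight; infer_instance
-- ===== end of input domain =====

-- B replaces A's bit-trick power-of-two test plus shift-counting loop by directly
-- dividing out factors of eight and checking the residue is 1 (simpler decomposition).

-- ===== PORT A =====
-- the `while n > 1: n >>= 1; count += 1` loop of A
def pvShiftCount (n : Int) (count : Int) : Int :=
  if 1 < n then pvShiftCount (n >>> (1 : Nat)) (count + 1) else count
termination_by n.toNat
decreasing_by
  have h2 : n >>> (1 : Nat) = n / 2 := by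
    rw [Int.shiftRight_eq_div_pow]; norm_num
  rw [h2]; omega

def powerEight (n : Int) : Int :=
  if PySem.Int.band n (n - 1) = 0 then
    (if PySem.Int.mod (pvShiftCount n 0) 3 = 0 then 1 else 0)
  else 0

-- ===== PORT B =====
-- the `while n % 8 == 0: n //= 8` loop of B; the `1 ≤ n` conjunct is a totality
-- guard only (B calls it with n ≥ 1 and the invariant is preserved)
def pvReduce8 (n : Int) : Int :=
  if h : 1 ≤ n ∧ PySem.Int.mod n 8 = 0 then pvReduce8 (PySem.Int.floordiv n 8) else n
termination_by n.toNat
decreasing_by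
  obtain ⟨h1, h2⟩ := h
  have hd : (8 : Int) ∣ n := (PySem.Int.mod_eq_zero_iff_dvd n 8).mp h2
  obtain ⟨q, hq⟩ := hd
  have hfd : PySem.Int.floordiv n 8 = q := by
    simp only [PySem.Int.floordiv, hq]
    exact Int.mul_fdiv_cancel_left q (by norm_num)
  rw [hfd]
  omega

def powerEight_alt (n : Int) : Int :=
  if n ≤ 0 then 0
  else if pvReduce8 n = 1 then 1 else 0

-- ===== PRECONDITION & SPEC =====
-- At n == 0 A returns 1 (0 & -1 == 0 and the loop never runs, so count stays 0),
-- while B returns 0; 0 is not a power of eight, so B's value is the intended one.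
def D_powerEight (n : Int) : Prop := n = 0
instance (n : Int) : Decidable (D_powerEight n) := by unfold D_powerEight; infer_instance
def Spec_powerEight (n : Int) (out : Int) : Prop := ¬ D_powerEight n → out = powerEight_alt n
instance (n : Int) (out : Int) : Decidable (Spec_powerEight n out) := by unfold Spec_powerEight; infer_instance
def pvDiffWitness_powerEight : Int := 0
def pvDiffWitnessOut_powerEight : Int × Int := (1, 0)

-- ===== CLAIM (what is proved, stated in full; the proofs are below) =====
def Claim_unchanged_powerEight : Prop := ∀ (n : Int), Dom_powerEight n → Spec_powerEight n (powerEight n)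
def Claim_changed_powerEight : Prop := Dom_powerEight (pvDiffWitness_powerEight) ∧ D_powerEight (pvDiffWitness_powerEight) ∧ powerEight (pvDiffWitness_powerEight) = pvDiffWitnessOut_powerEight.1 ∧ powerEight_alt (pvDiffWitness_powerEight) = pvDiffWitnessOut_powerEight.2 ∧ pvDiffWitnessOut_powerEight.1 ≠ pvDiffWitnessOut_powerEight.2
def Claim_exact_powerEight : Prop := ∀ (n : Int), Dom_powerEight n → D_powerEight n → powerEight n ≠ powerEight_alt n

-- ===== LEMMAS AND PROOFS =====

-- Python's n & (n-1) is negative (hence nonzero) for negative n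
theorem pv_band_neg_ne_zero (n : Int) (h : n < 0) : PySem.Int.band n (n - 1) ≠ 0 := by
  simp only [PySem.Int.band]
  have h1 : ¬ (0 ≤ n) := by omega
  have h2 : ¬ (0 ≤ n - 1) := by omega
  simp only [h1, h2, if_false]
  omega

-- Python's n & (n-1) for positive n, expressed over Nat
theorem pv_band_pos (n : Int) (h : 1 ≤ n) :
    PySem.Int.band n (n - 1) = ((n.toNat &&& (n.toNat - 1) : Nat) : Int) := by
  have h1 : (0 : Int) ≤ n := by omega
  have h2 : (0 : Int) ≤ n - 1 := by omega
  rw [PySem.Int.band_of_nonneg h1 h2]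
  have h3 : (n - 1).toNat = n.toNat - 1 := by omega
  rw [h3]

-- the classic bit trick: for m ≥ 1, m &&& (m-1) = 0 iff m is a power of two
theorem pv_land_pred_eq_zero_iff (m : Nat) (h : 1 ≤ m) :
    m &&& (m - 1) = 0 ↔ ∃ k, m = 2 ^ k := by
  induction m using Nat.strong_induction_on with
  | _ m ih =>
    rcases Nat.lt_or_ge m 2 with hm | hm
    · interval_cases m
      · simp only [show (1 : Nat) - 1 = 0 from rfl]
        constructor
        · intro _; exact ⟨0, rfl⟩
        · intro _; decide
    · rcases Nat.even_or_odd m with ⟨a, ha⟩ | ⟨a, ha⟩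
      · -- m = 2*a even, a ≥ 1 : m &&& (m-1) = 2*(a &&& (a-1))
        have ha1 : 1 ≤ a := by omega
        have hbit : m &&& (m - 1) = Nat.bit false (a &&& (a - 1)) := by
          have := Nat.land_bit false a true (a - 1)
          simp only [Nat.bit, cond_true, cond_false, Bool.false_and] at this ⊢
          have hm' : m = 2 * a := by omega
          have hm1 : m - 1 = 2 * (a - 1) + 1 := by omega
          rw [hm1, hm', this]
        rw [hbit]
        simp only [Nat.bit, cond_false]
        have iha := ih a (by omega) ha1
        constructor
        · intro hz
          have : a &&& (a - 1) = 0 := by omega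
          obtain ⟨k, hk⟩ := iha.mp this
          exact ⟨k + 1, by rw [pow_succ]; omega⟩
        · intro ⟨k, hk⟩
          have hk1 : 1 ≤ k := by
            by_contra hc
            interval_cases k <;> omega
          have : a = 2 ^ (k - 1) := by
            have : 2 ^ k = 2 ^ (k - 1) * 2 := by
              rw [← pow_succ]; congr 1; omega
            omega
          have : a &&& (a - 1) = 0 := iha.mpr ⟨k - 1, this⟩
          omega
      · -- m = 2*a+1 odd, a ≥ 1 : m &&& (m-1) = 2*a ≠ 0, and m is no power of two
        have ha1 : 1 ≤ a := by omega
        have hbit : m &&& (m - 1) = Nat.bit false (a &&& a) := by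
          have := Nat.land_bit true a false a
          simp only [Nat.bit, cond_true, cond_false, Bool.and_false] at this ⊢
          have hm' : m = 2 * a + 1 := by omega
          have hm1 : m - 1 = 2 * a := by omega
          rw [hm1, hm', this]
        rw [hbit]
        simp only [Nat.bit, cond_false, Nat.and_self]
        constructor
        · intro hz; omega
        · intro ⟨k, hk⟩
          have hk1 : 1 ≤ k := by
            by_contra hc
            interval_cases k <;> omega
          have : 2 ∣ m := hk ▸ dvd_pow_self 2 (by omega)
          omega

-- the while-loop of A counts the exponent on a power of two
theorem pv_shiftCount_pow2 (k : Nat) (c : Int) :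
    pvShiftCount ((2 : Int) ^ k) c = c + k := by
  induction k generalizing c with
  | zero => rw [pvShiftCount]; norm_num
  | succ k ih =>
    rw [pvShiftCount]
    have hgt : (1 : Int) < 2 ^ (k + 1) := by
      have : (2 : Int) ^ 1 ≤ 2 ^ (k + 1) := pow_le_pow_right₀ (by norm_num) (by omega)
      norm_num at this; omega
    rw [if_pos hgt]
    have hsh : ((2 : Int) ^ (k + 1)) >>> (1 : Nat) = 2 ^ k := by
      rw [Int.shiftRight_eq_div_pow]
      norm_num [pow_succ]
    rw [hsh, ih]
    push_cast
    ring

-- the while-loop of B on a power of two: result 1 exactly when 3 divides the exponent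
theorem pv_reduce8_pow2 (k : Nat) :
    pvReduce8 ((2 : Int) ^ k) = if k % 3 = 0 then 1 else 2 ^ (k % 3) := by
  induction k using Nat.strong_induction_on with
  | _ k ih =>
    rcases Nat.lt_or_ge k 3 with hk | hk
    · rw [pvReduce8.eq_def]
      have hnot : ¬ (1 ≤ (2:Int) ^ k ∧ PySem.Int.mod ((2:Int) ^ k) 8 = 0) := by
        interval_cases k <;> simp [PySem.Int.mod] <;> decide
      rw [dif_neg hnot]
      interval_cases k <;> norm_num
    · rw [pvReduce8.eq_def]
      have h8 : ((2:Int)) ^ k = 8 * 2 ^ (k - 3) := by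
        have : (8 : Int) = 2 ^ 3 := by norm_num
        rw [this, ← pow_add]
        congr 1; omega
      have hpos : (1 : Int) ≤ 2 ^ k := by
        have := pow_pos (show (0:Int) < 2 by norm_num) k
        omega
      have hmod : PySem.Int.mod ((2:Int) ^ k) 8 = 0 := by
        rw [PySem.Int.mod_eq_zero_iff_dvd]
        exact ⟨2 ^ (k - 3), h8⟩
      rw [dif_pos ⟨hpos, hmod⟩]
      have hdiv : PySem.Int.floordiv ((2:Int) ^ k) 8 = 2 ^ (k - 3) := by
        simp only [PySem.Int.floordiv]
        rw [h8]
        exact Int.mul_fdiv_cancel_left _ (by norm_num)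
      rw [hdiv, ih (k - 3) (by omega)]
      have : (k - 3) % 3 = k % 3 := by omega
      rw [this]

-- if B's loop ends at 1 starting from n ≥ 1, then n was a power of eight
theorem pv_reduce8_eq_one : ∀ (m : Nat) (n : Int), n.toNat = m → 1 ≤ n →
    pvReduce8 n = 1 → ∃ k, n = (2 : Int) ^ (3 * k) := by
  intro m
  induction m using Nat.strong_induction_on with
  | _ m ih =>
    intro n hm hn h1
    rw [pvReduce8.eq_def] at h1
    by_cases hc : 1 ≤ n ∧ PySem.Int.mod n 8 = 0
    · rw [dif_pos hc] at h1
      have hdvd : (8 : Int) ∣ n := (PySem.Int.mod_eq_zero_iff_dvd n 8).mp hc.2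
      obtain ⟨q, hq⟩ := hdvd
      have hfd : PySem.Int.floordiv n 8 = q := by
        simp only [PySem.Int.floordiv, hq]
        exact Int.mul_fdiv_cancel_left q (by norm_num)
      rw [hfd] at h1
      have hq1 : 1 ≤ q := by omega
      obtain ⟨k, hk⟩ := ih q.toNat (by omega) q rfl hq1 h1
      refine ⟨k + 1, ?_⟩
      rw [hq, hk]
      ring
    · rw [dif_neg hc] at h1
      exact ⟨0, by simpa using h1⟩

theorem pv_pow2_of_band_zero (n : Int) (h : 1 ≤ n)
    (hb : PySem.Int.band n (n - 1) = 0) : ∃ k : Nat, n = (2 : Int) ^ k := by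
  rw [pv_band_pos n h] at hb
  have hz : n.toNat &&& (n.toNat - 1) = 0 := by exact_mod_cast hb
  obtain ⟨k, hk⟩ := (pv_land_pred_eq_zero_iff n.toNat (by omega)).mp hz
  refine ⟨k, ?_⟩
  have h2 : (n.toNat : Int) = (2 : Int) ^ k := by rw [hk]; push_cast; ring
  have hn : n = (n.toNat : Int) := by omega
  rw [hn, h2]

theorem pv_mod3_iff (k : Nat) : PySem.Int.mod (k : Int) 3 = 0 ↔ k % 3 = 0 := by
  rw [PySem.Int.mod_eq_zero_iff_dvd]
  constructor
  · intro hd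
    have : (3 : Nat) ∣ k := by exact_mod_cast hd
    omega
  · intro hk
    have : (3 : Nat) ∣ k := by omega
    exact_mod_cast this

theorem powerEight_spec : Claim_unchanged_powerEight := by
  intro n _
  unfold Spec_powerEight
  intro hD
  have hn0 : n ≠ 0 := hD
  unfold powerEight powerEight_alt
  rcases lt_trichotomy n 0 with hlt | heq | hgt
  · rw [if_neg (pv_band_neg_ne_zero n hlt), if_pos (by omega : n ≤ 0)]
  · exact absurd heq hn0
  · have h1 : 1 ≤ n := hgt
    rw [if_neg (by omega : ¬ n ≤ 0)]
    by_cases hb : PySem.Int.band n (n - 1) = 0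
    · obtain ⟨k, hk⟩ := pv_pow2_of_band_zero n h1 hb
      subst hk
      rw [if_pos hb, pv_shiftCount_pow2 k 0, pv_reduce8_pow2 k]
      have hz : (0 : Int) + k = (k : Int) := by ring
      rw [hz]
      by_cases h3 : k % 3 = 0
      · rw [if_pos ((pv_mod3_iff k).mpr h3), if_pos (by rw [if_pos h3])]
      · have hne : ((2 : Int)) ^ (k % 3) ≠ 1 := by
          have h12 : k % 3 = 1 ∨ k % 3 = 2 := by omega
          rcases h12 with h | h <;> (rw [h]; norm_num)
        rw [if_neg (fun hc => h3 ((pv_mod3_iff k).mp hc)),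
            if_neg (by rw [if_neg h3]; exact hne)]
    · rw [if_neg hb]
      rw [if_neg]
      intro hr1
      obtain ⟨k, hk⟩ := pv_reduce8_eq_one n.toNat n rfl h1 hr1
      exact hb (by
        rw [pv_band_pos n h1]
        have ht : n.toNat = 2 ^ (3 * k) := by
          have hcast : n = ((2 ^ (3 * k) : Nat) : Int) := by rw [hk]; push_cast; ring
          omega
        have hz : n.toNat &&& (n.toNat - 1) = 0 :=
          (pv_land_pred_eq_zero_iff n.toNat (by omega)).mpr ⟨3 * k, ht⟩
        rw [hz]
        rfl)

theorem pv_powerEight_zero : powerEight 0 = 1 := by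
  unfold powerEight
  have hs : pvShiftCount 0 0 = 0 := by rw [pvShiftCount]; norm_num
  rw [if_pos (by decide), hs, if_pos (by decide)]

theorem pv_powerEight_alt_zero : powerEight_alt 0 = 0 := by
  unfold powerEight_alt
  rw [if_pos (by norm_num)]

theorem powerEight_changed : Claim_changed_powerEight := by
  unfold Claim_changed_powerEight pvDiffWitness_powerEight pvDiffWitnessOut_powerEight
  exact ⟨by decide, by decide, pv_powerEight_zero, pv_powerEight_alt_zero, by decide⟩

theorem powerEight_tight : Claim_exact_powerEight := by
  intro n _ hd
  rw [hd, pv_powerEight_zero, pv_powerEight_alt_zero]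
  decide
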